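-- pv_equiv track=rewrite | github.com/looking-for-my-magic-bean/leetcode | old/freewheel/freewheel.py | antiSpiralOrder
-- ===== SOURCE A (Python) =====
-- def antiSpiralOrder(matrix):
--     # # [::-1]为倒序输出的意思，也就实现了水平翻转
--     # matrix[:] = matrix[::-1]
--     # # zip用于将矩阵打包为元组的列表，实现转置功能，加上*号可以将元组转为矩阵
--     # test2 = zip(*matrix)
--     # test3 = map(list, test2)
--     # test4 = list(test3)
--     # 顺时针旋转90度，通过先水平翻转再转置来实现
--     matrix[:] = list(zip(*(matrix[::-1])))
--     # 转置
--     matrix = list(zip(*matrix))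
--     # 输出第一行
--     res = list(matrix.pop(0))
--     while matrix:
--         # 逆时针旋转90度，通过先转置后水平翻转实现
--         matrix = list(zip(*matrix))[::-1]
--         res += list(matrix.pop(0))
--     return res
-- ===== SOURCE B (Python) =====
-- def antiSpiralOrder(matrix):
--     # Boundary-pointer spiral: one O(n*m) pass over the flipped grid, instead of A's
--     # rebuilding the matrix by whole-matrix rotations each step (O(min(n,m)*n*m)).
--     # Rows contribute only up to the common (minimum) width, as zip() does in A.
--     # A mutates `matrix` in place; B does not (equivalence is about the return value).
--     grid = matrix[::-1]
--     width = min(map(len, grid))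
--     res = []
--     top, bottom, left, right = 0, len(grid) - 1, 0, width - 1
--     while top <= bottom and left <= right:
--         for j in range(left, right + 1):
--             res.append(grid[top][j])
--         top += 1
--         for i in range(top, bottom + 1):
--             res.append(grid[i][right])
--         right -= 1
--         if top <= bottom:
--             for j in range(right, left - 1, -1):
--                 res.append(grid[bottom][j])
--             bottom -= 1
--         if left <= right:
--             for i in range(bottom, top - 1, -1):
--                 res.append(grid[i][left])
--             left += 1
--     return res
-- ===== Notes on version B (the rewrite author's own statement) =====
-- stated objective: faster
-- what changed: replaces A's loop that rebuilds the whole matrix by a rotation (zip-transpose + reverse) before popping each row with a single boundary-pointer spiral walk over the flipped grid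
import Mathlib
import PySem

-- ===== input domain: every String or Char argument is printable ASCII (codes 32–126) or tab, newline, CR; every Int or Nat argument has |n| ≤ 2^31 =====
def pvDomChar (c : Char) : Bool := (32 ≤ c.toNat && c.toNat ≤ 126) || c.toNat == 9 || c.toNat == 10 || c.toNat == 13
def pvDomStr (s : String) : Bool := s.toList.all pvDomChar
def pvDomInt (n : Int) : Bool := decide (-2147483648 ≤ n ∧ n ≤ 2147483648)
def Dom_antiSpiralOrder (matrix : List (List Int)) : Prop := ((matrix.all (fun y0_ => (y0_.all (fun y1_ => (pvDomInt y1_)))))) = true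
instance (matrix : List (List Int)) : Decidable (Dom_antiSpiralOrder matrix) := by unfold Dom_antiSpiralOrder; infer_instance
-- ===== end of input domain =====

-- B replaces A's repeated whole-matrix rotate-and-pop with a single boundary-pointer
-- spiral walk; A mutates `matrix` in place (matrix[:] = ...), B does not — the
-- equivalence proved here is about the return value only.

-- ===== PORT A =====

-- zip(*m): transpose truncated to the shortest row (exact for Python zip on lists of ints)
def pyZipT (m : List (List Int)) : List (List Int) :=
  if m = [] then []
  else (List.range (((m.map List.length).min?).getD 0)).map
    (fun j => m.map (fun r => r.getD j 0))

-- total number of elements; fuel bound for A's while loop, which pops one row each turn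
def pvCells (m : List (List Int)) : Nat := (m.map List.length).sum

-- the while loop of A: `while matrix: matrix = list(zip(*matrix))[::-1]; res += list(matrix.pop(0))`
-- (the fuel argument only makes the recursion structural; it is never exhausted at the call site)
def aLoop : Nat → List (List Int) → List Int → List Int
  | 0, _, res => res
  | fuel + 1, m, res =>
    if m = [] then res
    else
      match (pyZipT m).reverse with
      | [] => res      -- Python: matrix.pop(0) raises IndexError here (outside Pre_)
      | row :: rest => aLoop fuel rest (res ++ row)

def antiSpiralOrder (matrix : List (List Int)) : List Int :=
  let m1 := pyZipT matrix.reverse   -- matrix[:] = list(zip(*(matrix[::-1])))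
  let m2 := pyZipT m1               -- matrix = list(zip(*matrix))
  match m2 with
  | [] => []                        -- Python: matrix.pop(0) raises IndexError (outside Pre_)
  | row :: rest => aLoop (pvCells rest + 1) rest row   -- res = list(matrix.pop(0)); while ...

-- ===== PORT B =====

-- grid[i][j] (all executed accesses are in range; pyGetD is Python indexing with a default)
def bGet (g : List (List Int)) (i j : Int) : Int :=
  PySem.List.pyGetD (PySem.List.pyGetD g i []) j 0

-- the while loop of Source B with its four for-passes over the boundary
-- (fuel only makes the recursion structural; the window shrinks by 2 each turn)
def bLoop (g : List (List Int)) : Nat → Int → Int → Int → Int → List Int → List Int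
  | 0, _, _, _, _, res => res
  | fuel + 1, top, bottom, left, right, res =>
    if top ≤ bottom ∧ left ≤ right then
      let res1 := res ++ (PySem.List.pyRange left (right+1) 1).map (fun j => bGet g top j)
      let res2 := res1 ++ (PySem.List.pyRange (top+1) (bottom+1) 1).map (fun i => bGet g i right)
      let res3 := if top + 1 ≤ bottom
        then res2 ++ (PySem.List.pyRange (right-1) (left-1) (-1)).map (fun j => bGet g bottom j)
        else res2
      let b2 : Int := if top + 1 ≤ bottom then bottom - 1 else bottom
      let res4 := if left ≤ right - 1
        then res3 ++ (PySem.List.pyRange b2 top (-1)).map (fun i => bGet g i left)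
        else res3
      let l2 : Int := if left ≤ right - 1 then left + 1 else left
      bLoop g fuel (top+1) b2 l2 (right-1) res4
    else res

def antiSpiralOrder_alt (matrix : List (List Int)) : List Int :=
  let grid := matrix.reverse                  -- grid = matrix[::-1]
  match (grid.map List.length).min? with      -- width = min(map(len, grid))
  | none => []                                -- Python: min() raises ValueError on [] (outside Pre_)
  | some w => bLoop grid (grid.length + w + 1) 0 ((grid.length : Int) - 1) 0 ((w : Int) - 1) []

-- ===== PRECONDITION & SPEC =====

-- Pre_ excludes exactly the inputs on which A raises: the empty matrix and any matrix
-- containing an empty row (zip truncates everything away and A pops from an empty list).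
def Pre_antiSpiralOrder (matrix : List (List Int)) : Prop :=
  matrix ≠ [] ∧ ∀ r ∈ matrix, r ≠ []
instance (matrix : List (List Int)) : Decidable (Pre_antiSpiralOrder matrix) := by
  unfold Pre_antiSpiralOrder; infer_instance

def pvWitness_antiSpiralOrder : List (List Int) := [[1, 2], [3, 4]]

def Spec_antiSpiralOrder (matrix : List (List Int)) (out : List Int) : Prop :=
  out = antiSpiralOrder_alt matrix
instance (matrix : List (List Int)) (out : List Int) : Decidable (Spec_antiSpiralOrder matrix out) := by
  unfold Spec_antiSpiralOrder; infer_instance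

-- ===== CLAIM (what is proved, stated in full; the proofs are below) =====
def Claim_equal_antiSpiralOrder : Prop := ∀ (matrix : List (List Int)), Dom_antiSpiralOrder matrix → Pre_antiSpiralOrder matrix → Spec_antiSpiralOrder matrix (antiSpiralOrder matrix)

-- ===== LEMMAS AND PROOFS =====

lemma pv_min_le {l : List Nat} {x : Nat} (hx : x ∈ l) : l.min?.getD 0 ≤ x := by
  cases h : l.min? with
  | none => simp
  | some a => simpa using (List.min?_eq_some_iff.mp h).2 x hx

lemma pv_len_mul_le_sum (l : List Nat) (k : Nat) (h : ∀ x ∈ l, k ≤ x) :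
    l.length * k ≤ l.sum := by
  induction l with
  | nil => simp
  | cons a t ih =>
    have ha := h a (by simp)
    have ht := ih (fun x hx => h x (by simp [hx]))
    simp only [List.length_cons, List.sum_cons]
    nlinarith

lemma pv_cells_pyZipT_le (m : List (List Int)) : pvCells (pyZipT m) ≤ pvCells m := by
  unfold pyZipT
  split
  · simp [pvCells]
  · simp only [pvCells, List.map_map]
    have h1 : ((List.range (((m.map List.length).min?).getD 0)).map
        (List.length ∘ fun j => m.map (fun r => r.getD j 0))).sum
        = ((m.map List.length).min?.getD 0) * m.length := by
      have hfn : (List.length ∘ fun j : Nat => m.map (fun r : List Int => r.getD j 0))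
          = fun _ => m.length := by funext j; simp
      rw [hfn]
      simp [List.sum_replicate]
    rw [h1]
    have := pv_len_mul_le_sum (m.map List.length) ((m.map List.length).min?.getD 0)
      (fun x hx => pv_min_le hx)
    simpa [Nat.mul_comm] using this

lemma pv_mem_pyZipT_length {m : List (List Int)} {row : List Int}
    (h : row ∈ pyZipT m) : row.length = m.length := by
  unfold pyZipT at h
  split at h
  · simp at h
  · obtain ⟨j, _, rfl⟩ := List.mem_map.mp h
    simp

-- one turn of A's loop strictly decreases the number of elements
lemma pv_rest_lt {m row : List (List Int)} {r0 : List Int} (hm : m ≠ [])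
    (hr : (pyZipT m).reverse = r0 :: row) : pvCells row < pvCells m := by
  have h1 : pvCells (pyZipT m) ≤ pvCells m := pv_cells_pyZipT_le m
  have h2 : r0 ∈ pyZipT m := by
    have : r0 ∈ (pyZipT m).reverse := by rw [hr]; exact List.mem_cons_self
    simpa using this
  have h3 : r0.length = m.length := pv_mem_pyZipT_length h2
  have h4 : 0 < m.length := List.length_pos_iff.mpr hm
  have h5 : pvCells ((pyZipT m).reverse) = pvCells (pyZipT m) := by
    simp [pvCells, List.map_reverse]
  rw [hr] at h5
  simp only [pvCells, List.map_cons, List.sum_cons] at h5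
  unfold pvCells at h1 ⊢
  omega

-- A's peeling process, written without fuel (proof-side mirror of aLoop)
def peelLoopW (m : List (List Int)) : List Int :=
  if hm : m = [] then []
  else
    match hr : (pyZipT m).reverse with
    | [] => []
    | row :: rest => row ++ peelLoopW rest
termination_by pvCells m
decreasing_by exact pv_rest_lt hm hr

-- peel X: pop the first row, then run A's rotate-and-pop loop on the rest
def peel (X : List (List Int)) : List Int :=
  match X with
  | [] => []
  | row :: rest => row ++ peelLoopW rest

lemma peel_nil : peel [] = [] := rfl

lemma aLoop_eq_peelLoopW (fuel : Nat) (m : List (List Int)) (res : List Int)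
    (h : pvCells m < fuel) : aLoop fuel m res = res ++ peelLoopW m := by
  induction fuel generalizing m res with
  | zero => omega
  | succ fuel ih =>
    rw [aLoop, peelLoopW]
    by_cases hm : m = []
    · simp [hm]
    · rw [dif_neg hm]
      simp only [if_neg hm]
      cases hr : (pyZipT m).reverse with
      | nil => simp
      | cons row rest =>
        have hlt := pv_rest_lt hm hr
        dsimp only
        rw [ih rest (res ++ row) (by omega)]
        simp

lemma peelLoopW_eq_peel (m : List (List Int)) : peelLoopW m = peel ((pyZipT m).reverse) := by
  rw [peelLoopW]
  by_cases hm : m = []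
  · simp [hm, peel, pyZipT]
  · rw [dif_neg hm]
    cases hr : (pyZipT m).reverse with
    | nil => simp [peel]
    | cons row rest => simp [peel]

-- rectangular matrix as a function of its indices
def mkM (h w : Nat) (f : Nat → Nat → Int) : List (List Int) :=
  (List.range h).map (fun i => (List.range w).map (fun j => f i j))

lemma mkM_congr {h w : Nat} {f f' : Nat → Nat → Int}
    (hf : ∀ i j, i < h → j < w → f i j = f' i j) : mkM h w f = mkM h w f' := by
  unfold mkM
  refine List.map_congr_left (fun i hi => ?_)
  refine List.map_congr_left (fun j hj => ?_)
  exact hf i j (List.mem_range.mp hi) (List.mem_range.mp hj)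

lemma mkM_zero (w : Nat) (f : Nat → Nat → Int) : mkM 0 w f = [] := rfl

lemma mkM_map_length (h w : Nat) (f : Nat → Nat → Int) :
    (mkM h w f).map List.length = List.replicate h w := by
  unfold mkM
  rw [List.map_map]
  have hfn : (List.length ∘ fun i => (List.range w).map (fun j => f i j)) = fun _ => w := by
    funext i; simp
  rw [hfn]
  simp [List.map_const']

lemma mkM_ne_nil (h w : Nat) (f : Nat → Nat → Int) (hh : 1 ≤ h) : mkM h w f ≠ [] := by
  unfold mkM
  simp [List.range_eq_nil]
  omega

lemma pyZipT_mkM (h w : Nat) (f : Nat → Nat → Int) (hh : 1 ≤ h) :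
    pyZipT (mkM h w f) = mkM w h (fun j i => f i j) := by
  unfold pyZipT
  rw [if_neg (mkM_ne_nil h w f hh), mkM_map_length,
    List.min?_replicate_of_pos (by omega : 0 < h)]
  simp only [Option.getD_some]
  unfold mkM
  refine List.map_congr_left fun j hj => ?_
  rw [List.map_map]
  refine List.map_congr_left fun i _ => ?_
  have hj' : j < w := List.mem_range.mp hj
  simp [List.getD_eq_getElem?_getD, List.getElem?_range hj']

lemma reverse_mkM (h w : Nat) (f : Nat → Nat → Int) :
    (mkM h w f).reverse = mkM h w (fun i j => f (h - 1 - i) j) := by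
  unfold mkM
  rw [← List.map_reverse]
  have hr : (List.range h).reverse = (List.range h).map (fun i => h - 1 - i) := by
    apply List.ext_getElem (by simp)
    intro i h1 h2
    simp [List.getElem_reverse]
  rw [hr, List.map_map]
  simp [Function.comp]

lemma rotCCW_mkM (h w : Nat) (f : Nat → Nat → Int) (hh : 1 ≤ h) :
    (pyZipT (mkM h w f)).reverse = mkM w h (fun j i => f i (w - 1 - j)) := by
  rw [pyZipT_mkM h w f hh, reverse_mkM]

lemma mkM_succ_cons (h w : Nat) (f : Nat → Nat → Int) :
    mkM (h + 1) w f = ((List.range w).map (f 0)) :: mkM h w (fun i => f (i + 1)) := by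
  unfold mkM
  rw [List.range_succ_eq_map]
  simp [List.map_map]

lemma pyZipT_mkM_w0 (h : Nat) (f : Nat → Nat → Int) : pyZipT (mkM h 0 f) = [] := by
  cases h with
  | zero => simp [mkM_zero, pyZipT]
  | succ n =>
    unfold pyZipT
    rw [if_neg (mkM_ne_nil _ _ f (by omega)), mkM_map_length,
      List.min?_replicate_of_pos (by omega : 0 < n + 1)]
    simp

lemma peel_mkM_w0 (h : Nat) (f : Nat → Nat → Int) : peel (mkM h 0 f) = [] := by
  cases h with
  | zero => rfl
  | succ n =>
    rw [mkM_succ_cons]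
    show ((List.range 0).map (f 0)) ++ peelLoopW (mkM n 0 fun i => f (i + 1)) = []
    rw [peelLoopW_eq_peel, pyZipT_mkM_w0]
    rfl


lemma peel_step (h w : Nat) (f : Nat → Nat → Int) (hh : 1 ≤ h) :
    peel (mkM h w f) = (List.range w).map (f 0)
      ++ peel (mkM w (h - 1) (fun j i => f (i + 1) (w - 1 - j))) := by
  obtain ⟨h', rfl⟩ : ∃ h', h = h' + 1 := ⟨h - 1, by omega⟩
  rw [mkM_succ_cons]
  show ((List.range w).map (f 0)) ++ peelLoopW (mkM h' w fun i => f (i + 1)) = _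
  rw [peelLoopW_eq_peel]
  congr 1
  cases Nat.eq_zero_or_pos h' with
  | inl h0 =>
    subst h0
    rw [mkM_zero]
    show peel ((pyZipT ([] : List (List Int))).reverse) = _
    rw [show pyZipT ([] : List (List Int)) = [] from by simp [pyZipT]]
    simp only [Nat.add_sub_cancel]
    rw [show ((0:Nat)) = 0 from rfl]
    exact (peel_mkM_w0 w _).symm ▸ rfl
  | inr hpos =>
    rw [rotCCW_mkM h' w _ hpos]
    simp only [Nat.add_sub_cancel]

lemma peel_layer (h w : Nat) (f : Nat → Nat → Int) (hh : 1 ≤ h) (hw : 1 ≤ w) :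
    peel (mkM h w f) =
      (List.range w).map (f 0)
      ++ (List.range (h - 1)).map (fun i => f (i + 1) (w - 1))
      ++ (if 2 ≤ h then (List.range (w - 1)).map (fun k => f (h - 1) (w - 2 - k)) else [])
      ++ (if 2 ≤ w then (List.range (h - 2)).map (fun k => f (h - 2 - k) 0) else [])
      ++ peel (mkM (h - 2) (w - 2) (fun i j => f (i + 1) (j + 1))) := by
  rw [peel_step h w f hh]
  rw [peel_step w (h - 1) _ hw]
  by_cases h2 : 2 ≤ h
  · have e2 : (mkM (h - 1) (w - 1) fun j i => f (h - 1 - 1 - j + 1) (w - 1 - (i + 1)))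
        = mkM (h - 1) (w - 1) (fun j i => f (h - 1 - j) (w - 2 - i)) :=
      mkM_congr (fun j i hj hi => by congr 1 <;> omega)
    rw [e2, peel_step (h - 1) (w - 1) _ (by omega)]
    by_cases w2 : 2 ≤ w
    · have e3 : (mkM (w - 1) (h - 1 - 1) fun j i => f (h - 1 - (i + 1)) (w - 2 - (w - 1 - 1 - j)))
          = mkM (w - 1) (h - 2) (fun j i => f (h - 2 - i) j) := by
        rw [show h - 1 - 1 = h - 2 from by omega]
        exact mkM_congr (fun j i hj hi => by congr 1 <;> omega)
      rw [e3, peel_step (w - 1) (h - 2) _ (by omega)]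
      have e4 : (mkM (h - 2) (w - 1 - 1) fun j i => f (h - 2 - (h - 2 - 1 - j)) (i + 1))
          = mkM (h - 2) (w - 2) (fun i j => f (i + 1) (j + 1)) := by
        rw [show w - 1 - 1 = w - 2 from by omega]
        exact mkM_congr (fun j i hj hi => by congr 1 <;> omega)
      rw [e4, if_pos h2, if_pos w2]
      simp [List.append_assoc]
    · have hw1 : w = 1 := by omega
      subst hw1
      rw [if_pos h2, if_neg w2]
      simp [mkM_zero, peel_nil, peel_mkM_w0]
  · have hh1 : h = 1 := by omega
    subst hh1
    rw [if_neg h2]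
    simp [mkM_zero, peel_nil]

lemma map_range_eq {n n' : Nat} {F G : Nat → Int} (hn : n = n')
    (hFG : ∀ k, k < n → F k = G k) :
    (List.range n).map F = (List.range n').map G := by
  subst hn
  exact List.map_congr_left (fun k hk => hFG k (List.mem_range.mp hk))

lemma bLoop_eq_peel (g : List (List Int)) (fuel : Nat) (t b l r : Int) (res : List Int)
    (hf : (b + 1 - t + (r + 1 - l)).toNat < fuel) :
    bLoop g fuel t b l r res
      = res ++ peel (mkM (b + 1 - t).toNat (r + 1 - l).toNat
          (fun i j => bGet g (t + i) (l + j))) := by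
  induction fuel generalizing t b l r res with
  | zero => omega
  | succ fuel ih =>
    rw [bLoop]
    by_cases hc : t ≤ b ∧ l ≤ r
    · rw [if_pos hc]
      obtain ⟨h1, h2⟩ := hc
      dsimp only
      rw [ih _ _ _ _ _ (by split_ifs <;> omega)]
      rw [peel_layer _ _ _ (by omega : 1 ≤ (b + 1 - t).toNat) (by omega : 1 ≤ (r + 1 - l).toNat)]
      by_cases hcb : t + 1 ≤ b
      · by_cases hcl : l ≤ r - 1
        · rw [if_pos hcb, if_pos hcb, if_pos hcl, if_pos (by omega : 2 ≤ (b + 1 - t).toNat),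
            if_pos (by omega : 2 ≤ (r + 1 - l).toNat), if_pos hcl]
          simp only [PySem.List.pyRange_one, PySem.List.pyRange_neg_one, List.map_map,
            List.append_assoc, Function.comp_def]
          congr 1
          refine congrArg₂ (· ++ ·) ?_ (congrArg₂ (· ++ ·) ?_ (congrArg₂ (· ++ ·) ?_
            (congrArg₂ (· ++ ·) ?_ ?_)))
          · exact map_range_eq rfl (fun k hk => by
              rw [show t + ((0:Nat):Int) = t from by omega])
          · exact map_range_eq (by omega) (fun k hk => by
              rw [show t + ((k+1:Nat):Int) = t + 1 + (k:Int) from by omega,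
                show l + (((r+1-l).toNat - 1 : Nat):Int) = r from by omega])
          · exact map_range_eq (by omega) (fun k hk => by
              rw [show t + (((b+1-t).toNat - 1 : Nat):Int) = b from by omega,
                show l + (((r+1-l).toNat - 2 - k : Nat):Int) = r - 1 - (k:Int) from by omega])
          · exact map_range_eq (by omega) (fun k hk => by
              rw [show t + (((b+1-t).toNat - 2 - k : Nat):Int) = b - 1 - (k:Int) from by omega,
                show l + ((0:Nat):Int) = l from by omega])
          · congr 1
            rw [show (b - 1 + 1 - (t + 1)).toNat = (b + 1 - t).toNat - 2 from by omega,
              show (r - 1 + 1 - (l + 1)).toNat = (r + 1 - l).toNat - 2 from by omega]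
            exact mkM_congr (fun i j _ _ => by
              rw [show t + ((i+1:Nat):Int) = t + 1 + (i:Int) from by omega,
                show l + ((j+1:Nat):Int) = l + 1 + (j:Int) from by omega])
        · simp only [if_pos hcb, if_neg hcl]
          rw [if_pos (by omega : 2 ≤ (b + 1 - t).toNat), if_neg (by omega : ¬ 2 ≤ (r + 1 - l).toNat)]
          simp only [PySem.List.pyRange_one, PySem.List.pyRange_neg_one, List.map_map,
            List.append_assoc, Function.comp_def]
          rw [show (r - 1 + 1 - l).toNat = 0 from by omega, peel_mkM_w0,
            show (r + 1 - l).toNat - 2 = 0 from by omega, peel_mkM_w0,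
            show (r - 1 - (l - 1)).toNat = 0 from by omega,
            show (r + 1 - l).toNat - 1 = 0 from by omega]
          simp only [List.range_zero, List.map_nil, List.append_nil]
          congr 1
          refine congrArg₂ (· ++ ·) ?_ ?_
          · exact map_range_eq rfl (fun k hk => by
              rw [show t + ((0:Nat):Int) = t from by omega])
          · exact map_range_eq (by omega) (fun k hk => by
              rw [show t + ((k+1:Nat):Int) = t + 1 + (k:Int) from by omega,
                show l + ((0:Nat):Int) = l from by omega,
                show r = l from by omega])
      · by_cases hcl : l ≤ r - 1
        · simp only [if_neg hcb, if_pos hcl]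
          rw [if_neg (by omega : ¬ 2 ≤ (b + 1 - t).toNat), if_pos (by omega : 2 ≤ (r + 1 - l).toNat)]
          simp only [PySem.List.pyRange_one, PySem.List.pyRange_neg_one, List.map_map,
            List.append_assoc, Function.comp_def]
          rw [show (b + 1 - (t + 1)).toNat = 0 from by omega,
            show (b + 1 - t).toNat - 1 = 0 from by omega,
            show (b + 1 - t).toNat - 2 = 0 from by omega,
            show (b - t).toNat = 0 from by omega]
          simp only [mkM_zero, peel_nil, List.range_zero, List.map_nil, List.append_nil]
          congr 1
          exact map_range_eq rfl (fun k hk => by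
            rw [show t + ((0:Nat):Int) = t from by omega])
        · simp only [if_neg hcb, if_neg hcl]
          rw [if_neg (by omega : ¬ 2 ≤ (b + 1 - t).toNat), if_neg (by omega : ¬ 2 ≤ (r + 1 - l).toNat)]
          simp only [PySem.List.pyRange_one, List.map_map, List.append_assoc,
            Function.comp_def]
          rw [show (b + 1 - (t + 1)).toNat = 0 from by omega,
            show (b + 1 - t).toNat - 1 = 0 from by omega,
            show (b + 1 - t).toNat - 2 = 0 from by omega]
          simp only [mkM_zero, peel_nil, List.range_zero, List.map_nil, List.append_nil]
          congr 1
          exact map_range_eq rfl (fun k hk => by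
            rw [show t + ((0:Nat):Int) = t from by omega])
    · rw [if_neg hc]
      have : (b + 1 - t).toNat = 0 ∨ (r + 1 - l).toNat = 0 := by omega
      rcases this with h0 | h0 <;> rw [h0]
      · simp [mkM_zero, peel_nil]
      · simp [peel_mkM_w0]

lemma pyZipT_eq_mkM (m : List (List Int)) (hm : m ≠ []) :
    pyZipT m = mkM ((m.map List.length).min?.getD 0) m.length (fun j i => bGet m i j) := by
  unfold pyZipT
  rw [if_neg hm]
  unfold mkM
  refine List.map_congr_left fun j hj => ?_
  have hj' : j < (m.map List.length).min?.getD 0 := List.mem_range.mp hj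
  apply List.ext_getElem (by simp)
  intro i hi1 hi2
  have hi : i < m.length := by simpa using hi1
  simp only [List.getElem_map, List.getElem_range]
  have hjlen : j < (m[i]).length := by
    have hmem : (m[i]).length ∈ m.map List.length :=
      List.mem_map_of_mem (List.getElem_mem hi)
    exact lt_of_lt_of_le hj' (pv_min_le hmem)
  rw [bGet, PySem.List.pyGetD_natCast, PySem.List.pyGetD_natCast,
    List.getD_eq_getElem m [] hi]

-- ===== VERDICT (by name: the statement is the Claim_ definition above) =====
set_option maxHeartbeats 1000000 in
theorem antiSpiralOrder_spec : Claim_equal_antiSpiralOrder := by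
  intro matrix _dom hpre
  obtain ⟨hne, hrows⟩ := hpre
  unfold Spec_antiSpiralOrder
  have hgne : matrix.reverse ≠ [] := by simpa using hne
  set grid := matrix.reverse with hgrid
  obtain ⟨k, hmin⟩ : ∃ k, (grid.map List.length).min? = some k := by
    cases hx : (grid.map List.length).min? with
    | none =>
      exfalso
      rw [List.min?_eq_none_iff] at hx
      exact hgne (by simpa using hx)
    | some k => exact ⟨k, rfl⟩
  have hkd : (grid.map List.length).min?.getD 0 = k := by rw [hmin]; rfl
  have hk1 : 1 ≤ k := by
    obtain ⟨row, hrow, hlen⟩ := List.mem_map.mp (List.min?_mem hmin)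
    have hne' : row ≠ [] := hrows row (List.mem_reverse.mp (hgrid ▸ hrow))
    have : 0 < row.length := List.length_pos_iff.mpr hne'
    omega
  have hn1 : 1 ≤ grid.length := List.length_pos_iff.mpr hgne
  have hB : antiSpiralOrder_alt matrix
      = peel (mkM grid.length k (fun i j => bGet grid i j)) := by
    unfold antiSpiralOrder_alt
    simp only [← hgrid, hmin]
    rw [bLoop_eq_peel _ _ _ _ _ _ _ (by omega)]
    rw [show ((grid.length:Int) - 1 + 1 - 0).toNat = grid.length from by omega,
      show ((k:Int) - 1 + 1 - 0).toNat = k from by omega]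
    simp only [List.nil_append]
    congr 1
    exact mkM_congr (fun i j _ _ => by
      rw [show (0:Int) + ((i:Nat):Int) = ((i:Nat):Int) from by omega,
        show (0:Int) + ((j:Nat):Int) = ((j:Nat):Int) from by omega])
  rw [hB]
  unfold antiSpiralOrder
  simp only [← hgrid]
  rw [pyZipT_eq_mkM grid hgne, hkd, pyZipT_mkM _ _ _ hk1]
  obtain ⟨n', hn'⟩ : ∃ n', grid.length = n' + 1 := ⟨grid.length - 1, by omega⟩
  rw [hn', mkM_succ_cons]
  dsimp only [peel]
  rw [aLoop_eq_peelLoopW _ _ _ (by omega)]
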